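-- pv_equiv track=rewrite | github.com/Shinichi0713/codility_Flags | solution.py | calculate_redistance
-- ===== SOURCE A (Python) =====
-- def calculate_redistance(peaks, distance_between, distance_restrict):
--     peaks_rearranged = [peaks[0]]
--     distance_between_rearranged = []
--     # dist_min = min(distance_between)
--     is_rearranged = False
--     for i in range(1, len(peaks)):
--         if peaks[i] - peaks[i-1] < distance_restrict and not is_rearranged:
--             is_rearranged = True
--             pass
--         elif is_rearranged:
--             peaks_rearranged.append(peaks[i])
--             distance_between_rearranged.append(peaks[i] - peaks[i-1])
--     return peaks_rearranged, distance_between_rearranged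
-- ===== SOURCE B (Python) =====
-- def calculate_redistance(peaks, distance_between, distance_restrict):
--     head = peaks[0]
--     cut = None
--     for i in range(1, len(peaks)):
--         if peaks[i] - peaks[i - 1] < distance_restrict:
--             cut = i
--             break
--     if cut is None:
--         return [head], []
--     return [head] + peaks[cut + 1:], [peaks[i] - peaks[i - 1] for i in range(cut + 1, len(peaks))]
-- ===== Notes on version B (the rewrite author's own statement) =====
-- stated objective: simpler
-- what changed: Replaces the single stateful flag loop with a two-phase find-then-build: locate the first sub-threshold gap, then produce the remaining peaks by slicing and their gaps by a comprehension.
import Mathlib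
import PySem

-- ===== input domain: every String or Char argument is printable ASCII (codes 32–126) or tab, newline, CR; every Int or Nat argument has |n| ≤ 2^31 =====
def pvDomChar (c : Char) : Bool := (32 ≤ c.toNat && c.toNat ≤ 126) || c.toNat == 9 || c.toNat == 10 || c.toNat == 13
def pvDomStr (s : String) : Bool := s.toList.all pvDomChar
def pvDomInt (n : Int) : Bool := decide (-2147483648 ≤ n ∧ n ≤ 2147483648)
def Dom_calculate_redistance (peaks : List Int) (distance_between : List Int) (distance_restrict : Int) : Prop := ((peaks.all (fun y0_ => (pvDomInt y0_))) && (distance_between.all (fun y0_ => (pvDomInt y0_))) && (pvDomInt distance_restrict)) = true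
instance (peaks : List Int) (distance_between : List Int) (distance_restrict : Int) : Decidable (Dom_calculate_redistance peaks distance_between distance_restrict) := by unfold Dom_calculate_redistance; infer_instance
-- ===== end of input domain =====

-- B replaces A's single stateful flag loop by a two-phase find-the-cutoff-then-build structure (objective: simpler).
-- Both programs ignore the `distance_between` argument, as the original Python does.

-- ===== PORT A =====
-- A's loop body: the two branches of A's if/elif over the state (peaks_rearranged, distance_between_rearranged, is_rearranged)
def pvStep (peaks : List Int) (dr : Int) (s : List Int × List Int × Bool) (i : Int) : List Int × List Int × Bool :=
  if PySem.List.pyGetD peaks i 0 - PySem.List.pyGetD peaks (i - 1) 0 < dr ∧ s.2.2 = false then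
    (s.1, s.2.1, true)
  else if s.2.2 then
    (s.1 ++ [PySem.List.pyGetD peaks i 0],
     s.2.1 ++ [PySem.List.pyGetD peaks i 0 - PySem.List.pyGetD peaks (i - 1) 0],
     s.2.2)
  else s

def calculate_redistance (peaks : List Int) (distance_between : List Int) (distance_restrict : Int) : List Int × List Int :=
  match PySem.List.pyGet? peaks 0 with
  | none => ([], [])  -- peaks[0] raises IndexError; excluded by Pre_
  | some p0 =>
    let s := (PySem.List.pyRange 1 (peaks.length : Int) 1).foldl (pvStep peaks distance_restrict) ([p0], [], false)
    (s.1, s.2.1)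

-- ===== PORT B =====
-- B's first phase: index of the first sub-threshold gap (Python's for-loop with break)
def pvFindCut (peaks : List Int) (distance_restrict : Int) (i : Nat) : Option Nat :=
  if h : i < peaks.length then
    if PySem.List.pyGetD peaks (i : Int) 0 - PySem.List.pyGetD peaks ((i : Int) - 1) 0 < distance_restrict then
      some i
    else pvFindCut peaks distance_restrict (i + 1)
  else none
termination_by peaks.length - i

def calculate_redistance_alt (peaks : List Int) (distance_between : List Int) (distance_restrict : Int) : List Int × List Int :=
  match PySem.List.pyGet? peaks 0 with
  | none => ([], [])  -- peaks[0] raises IndexError; excluded by Pre_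
  | some head =>
    match pvFindCut peaks distance_restrict 1 with
    | none => ([head], [])
    | some cut =>
      (head :: PySem.List.slice peaks (some ((cut : Int) + 1)) none,
       (PySem.List.pyRange ((cut : Int) + 1) (peaks.length : Int) 1).map
         (fun i => PySem.List.pyGetD peaks i 0 - PySem.List.pyGetD peaks (i - 1) 0))

-- ===== PRECONDITION & SPEC =====
-- Pre_ excludes only the empty peaks list, on which A raises IndexError at peaks[0].
def Pre_calculate_redistance (peaks : List Int) (distance_between : List Int) (distance_restrict : Int) : Prop := peaks ≠ []
instance (peaks : List Int) (distance_between : List Int) (distance_restrict : Int) : Decidable (Pre_calculate_redistance peaks distance_between distance_restrict) := by unfold Pre_calculate_redistance; infer_instance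
def pvWitness_calculate_redistance : List Int × List Int × Int := ([10, 12, 13, 20, 25], [2, 1, 7, 5], 2)

def Spec_calculate_redistance (peaks : List Int) (distance_between : List Int) (distance_restrict : Int) (out : List Int × List Int) : Prop := out = calculate_redistance_alt peaks distance_between distance_restrict
instance (peaks : List Int) (distance_between : List Int) (distance_restrict : Int) (out : List Int × List Int) : Decidable (Spec_calculate_redistance peaks distance_between distance_restrict out) := by unfold Spec_calculate_redistance; infer_instance

-- ===== CLAIM (what is proved, stated in full; the proofs are below) =====
def Claim_equal_calculate_redistance : Prop := ∀ (peaks : List Int) (distance_between : List Int) (distance_restrict : Int), Dom_calculate_redistance peaks distance_between distance_restrict → Pre_calculate_redistance peaks distance_between distance_restrict → Spec_calculate_redistance peaks distance_between distance_restrict (calculate_redistance peaks distance_between distance_restrict)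

-- ===== LEMMAS AND PROOFS =====

-- once the flag is true, A's loop appends every remaining element and every remaining gap
lemma pvFoldl_true (peaks : List Int) (dr : Int) (l : List Int) (a1 a2 : List Int) :
    l.foldl (pvStep peaks dr) (a1, a2, true) =
      (a1 ++ l.map (fun i => PySem.List.pyGetD peaks i 0),
       a2 ++ l.map (fun i => PySem.List.pyGetD peaks i 0 - PySem.List.pyGetD peaks (i - 1) 0),
       true) := by
  induction l generalizing a1 a2 with
  | nil => simp
  | cons x xs ih =>
    simp only [List.foldl_cons, List.map_cons]
    rw [show pvStep peaks dr (a1, a2, true) x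
        = (a1 ++ [PySem.List.pyGetD peaks x 0],
           a2 ++ [PySem.List.pyGetD peaks x 0 - PySem.List.pyGetD peaks (x - 1) 0], true) by
      simp [pvStep]]
    rw [ih]
    simp

-- with the flag still false, A's fold from index j is described by pvFindCut
lemma pvFoldl_false (peaks : List Int) (dr : Int) (j : Nat) (a1 a2 : List Int) :
    (PySem.List.pyRange (j : Int) (peaks.length : Int) 1).foldl (pvStep peaks dr) (a1, a2, false) =
      match pvFindCut peaks dr j with
      | none => (a1, a2, false)
      | some f =>
        (a1 ++ (PySem.List.pyRange ((f : Int) + 1) (peaks.length : Int) 1).map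
            (fun i => PySem.List.pyGetD peaks i 0),
         a2 ++ (PySem.List.pyRange ((f : Int) + 1) (peaks.length : Int) 1).map
            (fun i => PySem.List.pyGetD peaks i 0 - PySem.List.pyGetD peaks (i - 1) 0),
         true) := by
  induction hn : peaks.length - j generalizing j with
  | zero =>
    have hj : peaks.length ≤ j := by omega
    rw [pvFindCut, dif_neg (by omega)]
    rw [PySem.List.pyRange_one_eq_nil (by exact_mod_cast hj)]
    simp
  | succ n ih =>
    have hj : j < peaks.length := by omega
    rw [PySem.List.pyRange_one_cons (by exact_mod_cast hj)]
    simp only [List.foldl_cons]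
    rw [pvFindCut, dif_pos hj]
    by_cases hc : PySem.List.pyGetD peaks (j : Int) 0 - PySem.List.pyGetD peaks ((j : Int) - 1) 0 < dr
    · rw [if_pos hc]
      rw [show pvStep peaks dr (a1, a2, false) (j : Int) = (a1, a2, true) from by
        unfold pvStep; exact if_pos ⟨hc, rfl⟩]
      rw [pvFoldl_true]
    · rw [if_neg hc]
      rw [show pvStep peaks dr (a1, a2, false) (j : Int) = (a1, a2, false) from by
        unfold pvStep; rw [if_neg (fun h => hc h.1)]; rfl]
      have hcast : ((j : Int) + 1) = ((j + 1 : Nat) : Int) := by push_cast; ring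
      rw [hcast, ih (j + 1) (by omega)]

-- ===== VERDICT (by name: the statement is the Claim_ definition above) =====
theorem calculate_redistance_spec : Claim_equal_calculate_redistance := by
  intro peaks db dr _ hpre
  unfold Spec_calculate_redistance calculate_redistance calculate_redistance_alt
  cases peaks with
  | nil => exact absurd rfl hpre
  | cons p0 rest =>
    have hget : PySem.List.pyGet? (p0 :: rest) 0 = some p0 := by
      simp [PySem.List.pyGet?, PySem.List.pyIdx?]
    rw [hget]
    have h := pvFoldl_false (p0 :: rest) dr 1 [p0] []
    rw [show ((1 : Nat) : Int) = (1 : Int) from by norm_num] at h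
    simp only [h]
    cases hcut : pvFindCut (p0 :: rest) dr 1 with
    | none => rfl
    | some f =>
      refine Prod.ext ?_ rfl
      show [p0] ++ (PySem.List.pyRange ((f : Int) + 1) (((p0 :: rest).length : Nat) : Int) 1).map
          (fun i => PySem.List.pyGetD (p0 :: rest) i 0) =
        p0 :: PySem.List.slice (p0 :: rest) (some ((f : Int) + 1)) none
      rw [show ((f : Int) + 1) = ((f + 1 : Nat) : Int) from by push_cast; ring,
          PySem.List.slice_from_natCast,
          PySem.List.map_pyGetD_pyRange' (p0 :: rest) 0 (by positivity)]
      simp
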